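-- pv_equiv track=rewrite | github.com/Matheus19A/Hackathon_SD_2024_2 | Hackthon_Santo_Digital_2024/Exercicio_III_SD_Avancado.py | subconjuntos
-- ===== SOURCE A (Python) =====
-- def subconjuntos(nums, max_size=None, min_size=None, distinct_only=False, sort_subsets=False):
--     def gerar_subconjuntos(indice, atual):
--         if (max_size is None or len(atual) <= max_size) and (min_size is None or len(atual) >= min_size):
--             resultado.append(atual[:])
--         if indice == len(nums):
--             return
--         for i in range(indice, len(nums)):
--             if distinct_only and nums[i] in atual:
--                 continue
--             atual.append(nums[i])
--             gerar_subconjuntos(i + 1, atual)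
--             atual.pop()
--
--     resultado = []
--     gerar_subconjuntos(0, [])
--
--     if sort_subsets:
--         resultado = [sorted(subset) for subset in resultado]
--         resultado.sort()
--
--     return resultado
--
-- nums = [1, 2, 2]
-- ===== SOURCE B (Python) =====
-- def subconjuntos(nums, max_size=None, min_size=None, distinct_only=False, sort_subsets=False):
--     # Pure head/tail recursion returning the subsets that properly extend `atual`
--     # with elements of `resto`, in DFS pre-order; size filtering is a separate pass.
--     def ramos(atual, resto):
--         if not resto:
--             return []
--         x, cauda = resto[0], resto[1:]
--         if distinct_only and x in atual:
--             frente = []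
--         else:
--             novo = atual + [x]
--             frente = [novo] + ramos(novo, cauda)
--         return frente + ramos(atual, cauda)
--
--     todos = [[]] + ramos([], nums)
--     resultado = [s for s in todos
--                  if (max_size is None or len(s) <= max_size)
--                  and (min_size is None or len(s) >= min_size)]
--     if sort_subsets:
--         resultado = [sorted(s) for s in resultado]
--         resultado.sort()
--     return resultado
-- ===== Notes on version B (the rewrite author's own statement) =====
-- stated objective: simpler
-- what changed: The recursive backtracker that mutates a shared subset via append/pop, loops over indices, and interleaves the size test with generation is replaced by a pure head/tail recursion on the list that returns the subsets in the same DFS pre-order, with size filtering done in a separate comprehension pass; the sort_subsets postlude is unchanged.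
import Mathlib
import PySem

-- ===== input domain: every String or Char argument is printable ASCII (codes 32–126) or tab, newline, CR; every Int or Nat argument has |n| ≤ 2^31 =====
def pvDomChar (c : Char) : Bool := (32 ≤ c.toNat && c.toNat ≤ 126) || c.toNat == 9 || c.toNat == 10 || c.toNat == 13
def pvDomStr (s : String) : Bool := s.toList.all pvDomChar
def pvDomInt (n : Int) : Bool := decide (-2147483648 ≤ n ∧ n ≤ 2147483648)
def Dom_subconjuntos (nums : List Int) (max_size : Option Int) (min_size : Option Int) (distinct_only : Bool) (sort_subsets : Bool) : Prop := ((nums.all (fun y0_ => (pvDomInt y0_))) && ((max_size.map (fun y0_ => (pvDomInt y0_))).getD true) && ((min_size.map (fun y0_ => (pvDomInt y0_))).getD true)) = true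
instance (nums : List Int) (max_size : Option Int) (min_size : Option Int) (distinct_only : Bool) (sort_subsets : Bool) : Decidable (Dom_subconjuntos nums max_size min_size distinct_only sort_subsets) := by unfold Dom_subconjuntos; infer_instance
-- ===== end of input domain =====

-- B replaces A's recursive backtracking (shared mutable result list, append/pop, index loop, size test
-- interleaved with generation) by a pure head/tail recursion on the list that RETURNS the subsets in the
-- same DFS pre-order, followed by a separate size-filtering pass ("simpler": staged passes, no indices,
-- no shared state; same asymptotic cost, no speed claim).


-- ===== PORT A =====
-- A's size filter '(max_size is None or len(atual) <= max_size) and (min_size is None or len(atual) >= min_size)'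
def pvSizeOk (max_size min_size : Option Int) (atual : List Int) : Bool :=
  (match max_size with | none => true | some m => decide ((atual.length : Int) ≤ m)) &&
  (match min_size with | none => true | some m => decide (m ≤ (atual.length : Int)))

-- gerar_subconjuntos: 'atual.append(x); recurse; atual.pop()' passes 'atual ++ [x]' down; the
-- contributions the recursive calls append to 'resultado' are the concatenation (flatMap) over i.
-- fuel is a totality guard only: each call goes from indice to i+1 > indice, so nums.length+1 never runs out.
def pvGenA (nums : List Int) (max_size min_size : Option Int) (distinct_only : Bool) :
    Nat → Nat → List Int → List (List Int)
  | 0, _, _ => []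
  | fuel+1, indice, atual =>
    (if pvSizeOk max_size min_size atual then [atual] else []) ++
    (if indice = nums.length then [] else
      (List.range' indice (nums.length - indice)).flatMap (fun i =>
        let x := nums.getD i 0
        if distinct_only && atual.contains x then []
        else pvGenA nums max_size min_size distinct_only fuel (i+1) (atual ++ [x])))

def subconjuntos (nums : List Int) (max_size : Option Int) (min_size : Option Int) (distinct_only : Bool) (sort_subsets : Bool) : List (List Int) :=
  let resultado := pvGenA nums max_size min_size distinct_only (nums.length + 1) 0 []
  if sort_subsets then
    PySem.List.sorted (resultado.map (fun subset => PySem.List.sorted subset (fun x => x) false)) (fun x => x) false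
  else resultado

-- ===== PORT B =====
-- ramos(atual, resto): the subsets strictly extending 'atual' with elements of 'resto', in DFS pre-order;
-- structural recursion on 'resto' (resto[0], resto[1:] is head/tail).
def pvRamos (distinct_only : Bool) : List Int → List Int → List (List Int)
  | _, [] => []
  | atual, x :: cauda =>
    (if distinct_only && atual.contains x then []
     else (atual ++ [x]) :: pvRamos distinct_only (atual ++ [x]) cauda) ++
    pvRamos distinct_only atual cauda

def subconjuntos_alt (nums : List Int) (max_size : Option Int) (min_size : Option Int) (distinct_only : Bool) (sort_subsets : Bool) : List (List Int) :=
  let todos := ([] : List Int) :: pvRamos distinct_only [] nums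
  let resultado := todos.filter (fun s =>
    (max_size.all fun m => decide ((s.length : Int) ≤ m)) &&
    (min_size.all fun m => decide (m ≤ (s.length : Int))))
  if sort_subsets then
    PySem.List.sorted (resultado.map (fun s => PySem.List.sorted s (fun x => x) false)) (fun x => x) false
  else resultado

-- ===== PRECONDITION & SPEC =====
def Spec_subconjuntos (nums : List Int) (max_size : Option Int) (min_size : Option Int) (distinct_only : Bool) (sort_subsets : Bool) (out : List (List Int)) : Prop := out = subconjuntos_alt nums max_size min_size distinct_only sort_subsets
instance (nums : List Int) (max_size : Option Int) (min_size : Option Int) (distinct_only : Bool) (sort_subsets : Bool) (out : List (List Int)) : Decidable (Spec_subconjuntos nums max_size min_size distinct_only sort_subsets out) := by unfold Spec_subconjuntos; infer_instance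

-- ===== CLAIM (what is proved, stated in full; the proofs are below) =====
def Claim_equal_subconjuntos : Prop := ∀ (nums : List Int) (max_size : Option Int) (min_size : Option Int) (distinct_only : Bool) (sort_subsets : Bool), Dom_subconjuntos nums max_size min_size distinct_only sort_subsets → Spec_subconjuntos nums max_size min_size distinct_only sort_subsets (subconjuntos nums max_size min_size distinct_only sort_subsets)

-- ===== LEMMAS AND PROOFS =====

theorem pvGenA_fuel_irrel (nums : List Int) (ms mn : Option Int) (d : Bool) :
    ∀ (f1 f2 indice : Nat) (atual : List Int),
      nums.length - indice < f1 → nums.length - indice < f2 →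
      pvGenA nums ms mn d f1 indice atual = pvGenA nums ms mn d f2 indice atual := by
  intro f1
  induction f1 with
  | zero => intro f2 indice atual h1 h2; omega
  | succ f1 ih =>
    intro f2 indice atual h1 h2
    match f2, h2 with
    | f2+1, h2 =>
      simp only [pvGenA]
      congr 1
      by_cases hi : indice = nums.length
      · simp [hi]
      · simp only [hi, if_false]
        rw [List.flatMap_def, List.flatMap_def]
        congr 1
        apply List.map_congr_left
        intro i hmem
        obtain ⟨hlo, hhi⟩ : indice ≤ i ∧ i < indice + (nums.length - indice) := by
          have := List.mem_range'.mp hmem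
          obtain ⟨k, hk, rfl⟩ := this
          omega
        split
        · rfl
        · apply ih <;> omega

-- one unfolding of pvGenA at top fuel, with the guard folded away and fuel renormalised
theorem pvGenA_top (nums : List Int) (ms mn : Option Int) (d : Bool) (k : Nat) (a : List Int)
    (hk : k ≤ nums.length) :
    pvGenA nums ms mn d (nums.length + 1) k a
      = (if pvSizeOk ms mn a then [a] else []) ++
        (List.range' k (nums.length - k)).flatMap (fun i =>
          if d && a.contains (nums.getD i 0) then []
          else pvGenA nums ms mn d (nums.length + 1) (i+1) (a ++ [nums.getD i 0])) := by
  conv_lhs => rw [pvGenA]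
  congr 1
  by_cases hke : k = nums.length
  · simp [hke]
  · simp only [hke, if_false]
    rw [List.flatMap_def, List.flatMap_def]
    congr 1
    apply List.map_congr_left
    intro i hmem
    obtain ⟨j, hj, rfl⟩ := List.mem_range'.mp hmem
    split
    · rfl
    · apply pvGenA_fuel_irrel <;> omega

-- the loop over indices i = k .. len-1 produces exactly the size-filtered pvRamos of the suffix
theorem pvFlat_eq (nums : List Int) (ms mn : Option Int) (d : Bool) :
    ∀ (m k : Nat) (a : List Int), k + m = nums.length →
      (List.range' k m).flatMap (fun i =>
          if d && a.contains (nums.getD i 0) then []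
          else pvGenA nums ms mn d (nums.length + 1) (i+1) (a ++ [nums.getD i 0]))
        = (pvRamos d a (nums.drop k)).filter (pvSizeOk ms mn) := by
  intro m
  induction m with
  | zero =>
    intro k a hk
    have : nums.drop k = [] := by
      apply List.drop_eq_nil_of_le; omega
    simp [this, pvRamos]
  | succ m ih =>
    intro k a hk
    have hklt : k < nums.length := by omega
    have hdrop : nums.drop k = nums[k] :: nums.drop (k+1) := List.drop_eq_getElem_cons hklt
    have hgd : nums.getD k 0 = nums[k] := List.getD_eq_getElem nums 0 hklt
    rw [List.range'_succ, List.flatMap_cons, hdrop]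
    simp only [pvRamos, List.filter_append]
    rw [ih (k+1) a (by omega)]
    congr 1
    rw [hgd]
    by_cases hc : (d && a.contains nums[k]) = true
    · rw [if_pos hc, if_pos hc, List.filter_nil]
    · rw [if_neg hc, if_neg hc]
      rw [pvGenA_top nums ms mn d (k+1) (a ++ [nums[k]]) (by omega)]
      have hm : nums.length - (k+1) = m := by omega
      rw [hm, ih (k+1) (a ++ [nums[k]]) (by omega), List.filter_cons]
      split <;> simp
-- the B-side inline filter predicate is A's pvSizeOk
theorem pvSizeOk_eq (ms mn : Option Int) (s : List Int) :
    ((ms.all fun m => decide ((s.length : Int) ≤ m)) &&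
     (mn.all fun m => decide (m ≤ (s.length : Int)))) = pvSizeOk ms mn s := by
  cases ms <;> cases mn <;> simp [pvSizeOk, Option.all]

theorem subconjuntos_eq (nums : List Int) (ms mn : Option Int) (d s : Bool) :
    subconjuntos nums ms mn d s = subconjuntos_alt nums ms mn d s := by
  have hres : pvGenA nums ms mn d (nums.length + 1) 0 []
      = (([] : List Int) :: pvRamos d [] nums).filter (pvSizeOk ms mn) := by
    rw [pvGenA_top nums ms mn d 0 [] (Nat.zero_le _)]
    rw [Nat.sub_zero, pvFlat_eq nums ms mn d nums.length 0 [] (by omega)]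
    simp [List.filter_cons]
    split <;> simp
  simp only [subconjuntos, subconjuntos_alt]
  have hfilter : (([] : List Int) :: pvRamos d [] nums).filter (fun s =>
      (ms.all fun m => decide ((s.length : Int) ≤ m)) &&
      (mn.all fun m => decide (m ≤ (s.length : Int))))
      = (([] : List Int) :: pvRamos d [] nums).filter (pvSizeOk ms mn) := by
    apply List.filter_congr
    intro x _
    exact pvSizeOk_eq ms mn x
  rw [hres, ← hfilter]

-- ===== VERDICT (by name: the statement is the Claim_ definition above) =====
theorem subconjuntos_spec : Claim_equal_subconjuntos := by
  intro nums max_size min_size distinct_only sort_subsets _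
  unfold Spec_subconjuntos
  exact subconjuntos_eq nums max_size min_size distinct_only sort_subsets
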